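-- pv_equiv track=rewrite | github.com/PmXa/platzi_python | challenge_6_hangman.py | process_word
-- ===== SOURCE A (Python) =====
-- def process_word(word):
--     processed_word = {}
--     for index, element in enumerate(word):
--         if not (element in processed_word):
--             processed_word[element] = [index]
--         else:
--             processed_word[element].append(index)
--     return processed_word
-- ===== SOURCE B (Python) =====
-- def process_word(word):
--     return {c: [i for i, ch in enumerate(word) if ch == c] for c in dict.fromkeys(word)}
-- ===== Notes on version B (the rewrite author's own statement) =====
-- stated objective: idiomatic
-- what changed: Replaces the single accumulating dict-building pass with a dict comprehension: distinct characters are computed first via dict.fromkeys, then each key's index list is rebuilt by a full enumerate scan per key.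
import Mathlib
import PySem

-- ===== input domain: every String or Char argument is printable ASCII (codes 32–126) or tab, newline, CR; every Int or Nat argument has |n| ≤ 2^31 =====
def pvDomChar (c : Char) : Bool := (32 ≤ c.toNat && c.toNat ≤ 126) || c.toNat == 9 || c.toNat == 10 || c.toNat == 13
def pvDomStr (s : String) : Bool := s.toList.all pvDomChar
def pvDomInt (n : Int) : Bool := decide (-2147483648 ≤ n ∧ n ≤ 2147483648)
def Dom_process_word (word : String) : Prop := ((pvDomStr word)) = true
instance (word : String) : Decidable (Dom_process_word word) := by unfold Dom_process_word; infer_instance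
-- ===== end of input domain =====

-- B replaces A's single accumulating dict-building pass with a dict comprehension: distinct
-- characters first (dict.fromkeys), then one full enumerate scan per distinct character (idiomatic).

-- ===== PORT A =====
-- dict of single-char string keys, built by one pass: new key → [index], seen key → append index
def process_word (word : String) : List (String × List Int) :=
  ((PySem.List.enumerate word.toList).foldl
    (fun d p =>
      if !(d.contains (String.ofList [p.2])) then
        d.insert (String.ofList [p.2]) [p.1]
      else
        d.modify (String.ofList [p.2]) [] (fun l => l ++ [p.1]))
    PySem.Dict.empty).items

-- ===== PORT B =====
-- dict.fromkeys(word) = PySem.List.dedup of the characters; per key a full left-to-right scan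
def process_word_alt (word : String) : List (String × List Int) :=
  (PySem.List.dedup word.toList).map
    (fun c => (String.ofList [c],
      (PySem.List.enumerate word.toList).filterMap
        (fun p => if p.2 = c then some p.1 else none)))

-- ===== PRECONDITION & SPEC =====
def Spec_process_word (word : String) (out : List (String × List Int)) : Prop := out = process_word_alt word
instance (word : String) (out : List (String × List Int)) : Decidable (Spec_process_word word out) := by unfold Spec_process_word; infer_instance

-- ===== CLAIM (what is proved, stated in full; the proofs are below) =====
def Claim_equal_process_word : Prop := ∀ (word : String), Dom_process_word word → Spec_process_word word (process_word word)

-- ===== LEMMAS AND PROOFS =====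

theorem pv_strmk_inj (c c' : Char) (h : String.ofList [c] = String.ofList [c']) : c = c' := by
  have := congrArg String.toList h
  simpa using this

-- A's branching step is, pointwise, the unconditional modify step
theorem pv_step_eq (d : PySem.Dict String (List Int)) (p : Int × Char) :
    (if !(d.contains (String.ofList [p.2])) then
        d.insert (String.ofList [p.2]) [p.1]
      else
        d.modify (String.ofList [p.2]) [] (fun l => l ++ [p.1]))
    = d.modify (String.ofList [p.2]) [] (fun l => l ++ [p.1]) := by
  by_cases h : d.contains (String.ofList [p.2]) = true
  · simp [h]
  · simp only [Bool.not_eq_true] at h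
    simp [h, PySem.Dict.modify, PySem.Dict.getD_of_not_contains d [] h]

-- ordered dedup commutes with an injective map
theorem pv_ofList_map {α β : Type} [BEq α] [LawfulBEq α] [BEq β] [LawfulBEq β]
    (f : α → β) (hf : ∀ a a', f a = f a' → a = a') (xs : List α) :
    PySem.Set.ofList (xs.map f) = (PySem.Set.ofList xs).map f := by
  induction xs using List.reverseRecOn with
  | nil => rfl
  | append_singleton xs x ih =>
    rw [List.map_append, List.map_cons, List.map_nil, PySem.Set.ofList_append_singleton,
      PySem.Set.ofList_append_singleton, ih]
    by_cases hx : x ∈ xs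
    · have hx' : x ∈ PySem.Set.ofList xs := (PySem.Set.mem_ofList _ _).mpr hx
      have h1 : f x ∈ (PySem.Set.ofList xs).map f := List.mem_map_of_mem hx'
      rw [PySem.Set.add_of_mem h1, PySem.Set.add_of_mem hx']
    · have hx' : x ∉ PySem.Set.ofList xs := fun hmem =>
        hx ((PySem.Set.mem_ofList _ _).mp hmem)
      have h1 : f x ∉ (PySem.Set.ofList xs).map f := by
        simp only [List.mem_map]
        rintro ⟨a, ha, hfa⟩
        have : a = x := hf a x hfa
        exact hx' (this ▸ ha)
      rw [PySem.Set.add_of_not_mem h1, PySem.Set.add_of_not_mem hx', List.map_append,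
        List.map_cons, List.map_nil]

-- filter-by-key then project = the per-character filterMap scan of B
theorem pv_filter_filterMap (L : List (Int × Char)) (c : Char) :
    ((L.map (fun p => (String.ofList [p.2], p.1))).filter
        (fun q => q.1 == String.ofList [c])).map (fun x => x.2)
    = L.filterMap (fun p => if p.2 = c then some p.1 else none) := by
  induction L with
  | nil => rfl
  | cons p L ih =>
    by_cases h : p.2 = c
    · simp [h, ih]
    · have h' : ¬ (String.ofList [p.2] = String.ofList [c]) :=
        fun hh => h (pv_strmk_inj _ _ hh)
      simp [h, h', ih]

-- ===== VERDICT (by name: the statement is the Claim_ definition above) =====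
theorem process_word_spec : Claim_equal_process_word := by
  intro word _
  unfold Spec_process_word process_word process_word_alt
  have hstep :
      ((PySem.List.enumerate word.toList).foldl (fun d p =>
        if !(d.contains (String.ofList [p.2])) then
          d.insert (String.ofList [p.2]) [p.1]
        else
          d.modify (String.ofList [p.2]) [] (fun l => l ++ [p.1])) PySem.Dict.empty)
      = (PySem.List.enumerate word.toList).foldl
          (fun d p => d.modify (String.ofList [p.2]) [] (fun l => l ++ [p.1]))
          PySem.Dict.empty := by
    simp only [pv_step_eq]
  rw [hstep]
  set D := (PySem.List.enumerate word.toList).foldl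
      (fun d p => d.modify (String.ofList [p.2]) [] (fun l => l ++ [p.1]))
      PySem.Dict.empty with hD
  have hmapmap : (PySem.List.enumerate word.toList).map (fun p => String.ofList [p.2])
      = word.toList.map (fun c => String.ofList [c]) := by
    have h2 := PySem.List.map_snd_enumerate word.toList 0
    calc (PySem.List.enumerate word.toList).map (fun p => String.ofList [p.2])
        = ((PySem.List.enumerate word.toList).map (fun p => p.2)).map
            (fun c => String.ofList [c]) := by rw [List.map_map]; rfl
      _ = word.toList.map (fun c => String.ofList [c]) := by rw [h2]
  have hkeys : D.keys = (PySem.List.dedup word.toList).map (fun c => String.ofList [c]) := by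
    rw [hD, PySem.Dict.keys_foldl_modify_key (PySem.List.enumerate word.toList)
        (fun p => String.ofList [p.2]) [] (fun _ p l => l ++ [p.1]) PySem.Dict.empty]
    rw [PySem.Dict.keys_empty, PySem.Set.update_nil_left, hmapmap,
      pv_ofList_map _ pv_strmk_inj, PySem.List.dedup]
  have hnodup : D.keys.Nodup := by
    rw [hD]
    exact PySem.Dict.nodup_keys_foldl_modify_key (PySem.List.enumerate word.toList)
      (fun p => String.ofList [p.2]) [] (fun _ p l => l ++ [p.1]) PySem.Dict.empty (by simp)
  have hget : ∀ c : Char, D.getD (String.ofList [c]) [] =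
      (PySem.List.enumerate word.toList).filterMap
        (fun p => if p.2 = c then some p.1 else none) := by
    intro c
    have hfm : D = ((PySem.List.enumerate word.toList).map
          (fun p => (String.ofList [p.2], p.1))).foldl
            (fun d q => d.modify q.1 [] (fun l => l ++ [q.2])) PySem.Dict.empty := by
      rw [hD, List.foldl_map]
    rw [hfm, PySem.Dict.getD_foldl_modify_append, PySem.Dict.getD_empty,
      List.nil_append, pv_filter_filterMap]
  rw [PySem.Dict.items_eq_map_keys D hnodup [], hkeys, List.map_map]
  apply List.map_congr_left
  intro c _
  simp only [Function.comp]
  rw [hget c]
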